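-- pv_equiv track=rewrite | github.com/rednuht/aoc_2020 | day24/main.py | color_count
-- ===== SOURCE A (Python) =====
-- def color_count(tiles, coordinates):
--     nr_black, nr_white = 0, 0
--     for coordinate in coordinates:
--         if coordinate not in tiles:
--             continue
--         if tiles[coordinate] == 'b':
--             nr_black += 1
--         else:
--             nr_white += 1
--
--     return nr_black, nr_white
-- ===== SOURCE B (Python) =====
-- def color_count(tiles, coordinates):
--     # Inverted traversal: tally coordinate multiplicities once, then walk the
--     # tiles' items and weight each color by its coordinate's multiplicity.
--     freq = {}
--     for c in coordinates:
--         freq[c] = freq.get(c, 0) + 1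
--     nr_black, nr_white = 0, 0
--     for coord, color in tiles.items():
--         n = freq.get(coord, 0)
--         if color == 'b':
--             nr_black += n
--         else:
--             nr_white += n
--     return nr_black, nr_white
-- ===== Notes on version B (the rewrite author's own statement) =====
-- stated objective: alternative
-- what changed: Inverts the traversal: B first builds a frequency counter of the coordinates, then iterates the tiles' items once, adding each coordinate's multiplicity to the black or white total according to the tile's color; A instead loops over coordinates looking each one up in tiles.
import Mathlib
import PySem

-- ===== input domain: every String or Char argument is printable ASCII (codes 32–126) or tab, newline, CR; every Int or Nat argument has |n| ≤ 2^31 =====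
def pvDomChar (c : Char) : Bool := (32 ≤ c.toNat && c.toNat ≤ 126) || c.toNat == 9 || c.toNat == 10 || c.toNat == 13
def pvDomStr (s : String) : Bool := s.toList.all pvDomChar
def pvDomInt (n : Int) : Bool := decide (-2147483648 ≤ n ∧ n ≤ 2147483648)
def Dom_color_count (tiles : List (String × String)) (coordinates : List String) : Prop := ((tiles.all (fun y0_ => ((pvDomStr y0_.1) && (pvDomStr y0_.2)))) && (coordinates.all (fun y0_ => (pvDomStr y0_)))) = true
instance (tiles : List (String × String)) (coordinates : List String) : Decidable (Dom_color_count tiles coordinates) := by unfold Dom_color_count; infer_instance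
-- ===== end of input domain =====

-- B inverts the traversal (alternative): it builds a frequency counter of the coordinates
-- once, then walks the tiles' items, weighting each color by its coordinate's multiplicity.

-- ===== PORT A =====
-- one pass over coordinates, maintaining (nr_black, nr_white)
def color_count (tiles : List (String × String)) (coordinates : List String) : Int × Int :=
  coordinates.foldl
    (fun (s : Int × Int) c =>
      match (PySem.Dict.mk tiles).get? c with
      | none => s
      | some v => if v == "b" then (s.1 + 1, s.2) else (s.1, s.2 + 1))
    (0, 0)

-- ===== PORT B =====
-- freq[c] = freq.get(c,0)+1 over coordinates; then loop over tiles.items()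
-- (the dict's items ARE the tiles list, whose keys Pre_ demands distinct),
-- adding freq.get(coord, 0) to black or white depending on the color.
def ccFreq (coordinates : List String) : PySem.Dict String Int :=
  coordinates.foldl (fun d c => d.insert c (d.getD c 0 + 1)) PySem.Dict.empty

def color_count_alt (tiles : List (String × String)) (coordinates : List String) : Int × Int :=
  tiles.foldl
    (fun (s : Int × Int) p =>
      if p.2 == "b" then (s.1 + (ccFreq coordinates).getD p.1 0, s.2)
      else (s.1, s.2 + (ccFreq coordinates).getD p.1 0))
    (0, 0)

-- ===== PRECONDITION & SPEC =====
-- tiles is a Python dict, so its keys are necessarily distinct; Pre_ only rules out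
-- association lists with duplicate keys, which no Python dict input can produce.
def Pre_color_count (tiles : List (String × String)) (coordinates : List String) : Prop :=
  (tiles.map Prod.fst).Nodup
instance (tiles : List (String × String)) (coordinates : List String) : Decidable (Pre_color_count tiles coordinates) := by unfold Pre_color_count; infer_instance

def pvWitness_color_count : (List (String × String)) × List String := ([("a", "b"), ("c", "w")], ["a", "c", "a", "x"])

def Spec_color_count (tiles : List (String × String)) (coordinates : List String) (out : Int × Int) : Prop := out = color_count_alt tiles coordinates
instance (tiles : List (String × String)) (coordinates : List String) (out : Int × Int) : Decidable (Spec_color_count tiles coordinates out) := by unfold Spec_color_count; infer_instance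

-- ===== CLAIM (what is proved, stated in full; the proofs are below) =====
def Claim_equal_color_count : Prop := ∀ (tiles : List (String × String)) (coordinates : List String), Dom_color_count tiles coordinates → Pre_color_count tiles coordinates → Spec_color_count tiles coordinates (color_count tiles coordinates)

-- ===== LEMMAS AND PROOFS =====

-- A's loop, with a generalized accumulator: it adds to the first component the number of
-- coordinates whose lookup yields "b", and to the second the other successful lookups.
theorem ccA_loop (d : PySem.Dict String String) (cs : List String) (a b : Int) :
    cs.foldl
      (fun (s : Int × Int) c =>
        match d.get? c with
        | none => s
        | some v => if v == "b" then (s.1 + 1, s.2) else (s.1, s.2 + 1))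
      (a, b)
    = (a + (cs.countP (fun c => match d.get? c with | some v => v == "b" | none => false) : Int),
       b + (cs.countP (fun c => match d.get? c with | some v => !(v == "b") | none => false) : Int)) := by
  induction cs generalizing a b with
  | nil => simp
  | cons c cs ih =>
    simp only [List.foldl_cons, List.countP_cons]
    cases h : d.get? c with
    | none => rw [ih]; simp
    | some v =>
      by_cases hv : v = "b"
      · subst hv
        simp only [beq_self_eq_true, if_true]
        rw [ih]; simp [Prod.ext_iff]; all_goals omega
      · have hv' : (v == "b") = false := by simpa using hv
        simp only [hv', Bool.false_eq_true, if_false]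
        rw [ih]; simp [Prod.ext_iff]; all_goals omega

-- B's loop, with a generalized accumulator, as two weighted sums over the tiles list.
theorem ccB_loop (cnt : String → Int) (ts : List (String × String)) (a b : Int) :
    ts.foldl
      (fun (s : Int × Int) p =>
        if p.2 == "b" then (s.1 + cnt p.1, s.2) else (s.1, s.2 + cnt p.1))
      (a, b)
    = (a + (ts.map (fun p => if p.2 == "b" then cnt p.1 else 0)).sum,
       b + (ts.map (fun p => if p.2 == "b" then 0 else cnt p.1)).sum) := by
  induction ts generalizing a b with
  | nil => simp
  | cons p ts ih =>
    simp only [List.foldl_cons, List.map_cons, List.sum_cons]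
    by_cases hp : p.2 = "b"
    · have hp' : (p.2 == "b") = true := by simpa using hp
      simp only [hp', if_true]
      rw [ih]; simp [Prod.ext_iff]; all_goals omega
    · have hp' : (p.2 == "b") = false := by simpa using hp
      simp only [hp', Bool.false_eq_true, if_false]
      rw [ih]; simp [Prod.ext_iff]; all_goals omega

-- With distinct keys, the 0/1 indicator sum over the tiles at a fixed coordinate c
-- is the lookup's value at c tested by q.
theorem cc_indicator (q : String → Bool) (ts : List (String × String)) (c : String)
    (hnd : (ts.map Prod.fst).Nodup) :
    (ts.map (fun p => if p.1 = c ∧ q p.2 then (1 : Int) else 0)).sum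
    = (match (PySem.Dict.mk ts).get? c with | some v => if q v then (1 : Int) else 0 | none => 0) := by
  induction ts with
  | nil => simp [PySem.Dict.get?]
  | cons p ts ih =>
    obtain ⟨k, v⟩ := p
    simp only [List.map_cons, List.sum_cons]
    have hnd' : (ts.map Prod.fst).Nodup := (List.nodup_cons.mp hnd).2
    have hk : k ∉ ts.map Prod.fst := (List.nodup_cons.mp hnd).1
    rw [PySem.Dict.get?_mk_cons]
    by_cases hkc : k = c
    · subst hkc
      have hzero : (ts.map (fun p => if p.1 = k ∧ q p.2 then (1 : Int) else 0)).sum = 0 := by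
        apply List.sum_eq_zero
        intro x hx
        simp only [List.mem_map] at hx
        obtain ⟨p, hp, rfl⟩ := hx
        have hne : p.1 ≠ k := fun h => hk (h ▸ List.mem_map_of_mem hp)
        simp [hne]
      by_cases hq : q v = true <;> simp [hzero, hq]
    · have hkc' : (k == c) = false := by simpa using hkc
      have hkc'' : ¬ (k = c) := hkc
      simp only [hkc', Bool.false_eq_true, if_false]
      rw [← ih hnd']
      simp [hkc]

-- With distinct keys, the weighted sum over the tiles equals the count over coordinates
-- of successful lookups whose value satisfies q.
theorem cc_sum (q : String → Bool) (ts : List (String × String)) (cs : List String)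
    (hnd : (ts.map Prod.fst).Nodup) :
    (ts.map (fun p => if q p.2 then (cs.count p.1 : Int) else 0)).sum
    = (cs.countP (fun c => match (PySem.Dict.mk ts).get? c with | some v => q v | none => false) : Int) := by
  induction cs with
  | nil => simp
  | cons c cs ih =>
    have hterm : ∀ p ∈ ts,
        (if q p.2 then (((c :: cs).count p.1 : Nat) : Int) else 0)
        = (if q p.2 then (cs.count p.1 : Int) else 0) + (if p.1 = c ∧ q p.2 then (1 : Int) else 0) := by
      intro p _
      by_cases hq : q p.2 = true <;> by_cases hc : p.1 = c <;>
        simp [hq, hc, List.count_cons] <;> exact fun h => hc h.symm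
    rw [List.map_congr_left hterm, PySem.List.sum_map_add_int, cc_indicator q ts c hnd, ih,
        List.countP_cons]
    cases h : (PySem.Dict.mk ts).get? c with
    | none => simp
    | some v => by_cases hq : q v = true <;> simp [hq]

-- ===== VERDICT (by name: the statement is the Claim_ definition above) =====
theorem color_count_spec : Claim_equal_color_count := by
  intro tiles coordinates _ hpre
  unfold Spec_color_count color_count color_count_alt
  rw [ccA_loop, ccB_loop (fun k => (ccFreq coordinates).getD k 0)]
  have hcnt : ∀ k, (ccFreq coordinates).getD k 0 = (coordinates.count k : Int) := by
    intro k
    unfold ccFreq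
    rw [PySem.Dict.getD_foldl_insert_add_one]
    simp [PySem.Dict.getD_empty]
  have hB : (tiles.map (fun p => if p.2 == "b" then (ccFreq coordinates).getD p.1 0 else 0))
      = tiles.map (fun p => if ((· == "b") : String → Bool) p.2 then (coordinates.count p.1 : Int) else 0) := by
    apply List.map_congr_left; intro p _; rw [hcnt]
  have hW : (tiles.map (fun p => if p.2 == "b" then 0 else (ccFreq coordinates).getD p.1 0))
      = tiles.map (fun p => if ((fun v => !(v == "b")) : String → Bool) p.2 then (coordinates.count p.1 : Int) else 0) := by
    apply List.map_congr_left; intro p _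
    by_cases hp : p.2 = "b" <;> simp [hp, hcnt]
  have hBsum := congrArg List.sum hB
  have hWsum := congrArg List.sum hW
  rw [hBsum, hWsum, cc_sum (fun v => v == "b") tiles coordinates hpre,
      cc_sum (fun v => !(v == "b")) tiles coordinates hpre]
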